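-- pv_equiv track=rewrite | github.com/Watashicuvu/alethea | src/ingestion/synthesizer.py | _cluster_beats
-- ===== SOURCE A (Python) =====
-- from typing import Dict, List, Any, Optional, Tuple, Set
--
-- def _cluster_beats(beats: List[Tuple[int, str]], gap_threshold: int = 15):
--     if not beats: return []
--     beats.sort(key=lambda x: x[0])
--     clusters = []
--     current = [beats[0]]
--     for i in range(1, len(beats)):
--         if beats[i][0] - beats[i-1][0] > gap_threshold:
--             clusters.append(current)
--             current = []
--         current.append(beats[i])
--     if current: clusters.append(current)
--     return clusters
-- ===== SOURCE B (Python) =====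
-- def _cluster_beats(beats, gap_threshold=15):
--     if not beats: return []
--     beats.sort(key=lambda x: x[0])
--     n = len(beats)
--     cuts = [i for i in range(1, n) if beats[i][0] - beats[i-1][0] > gap_threshold]
--     bounds = [0] + cuts + [n]
--     return [beats[a:b] for a, b in zip(bounds, bounds[1:])]
-- ===== Notes on version B (the rewrite author's own statement) =====
-- stated objective: alternative
-- what changed: Replaces the accumulate-current-cluster sweep with a two-phase index decomposition: one pass collects the split indices where the gap exceeds the threshold, then clusters are produced by slicing the sorted list between consecutive boundaries.
import Mathlib
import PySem

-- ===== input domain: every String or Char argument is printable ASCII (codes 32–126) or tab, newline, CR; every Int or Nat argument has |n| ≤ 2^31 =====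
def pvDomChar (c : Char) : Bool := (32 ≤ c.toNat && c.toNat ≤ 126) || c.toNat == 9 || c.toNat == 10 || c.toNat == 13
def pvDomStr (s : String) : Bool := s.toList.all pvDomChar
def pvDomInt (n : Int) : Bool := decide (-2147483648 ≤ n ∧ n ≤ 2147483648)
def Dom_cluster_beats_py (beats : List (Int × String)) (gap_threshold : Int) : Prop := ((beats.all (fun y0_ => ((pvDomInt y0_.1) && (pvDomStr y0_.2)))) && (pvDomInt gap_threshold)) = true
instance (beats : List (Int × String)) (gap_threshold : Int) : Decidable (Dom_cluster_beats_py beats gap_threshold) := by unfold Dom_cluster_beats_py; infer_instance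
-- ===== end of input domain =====

-- B replaces A's accumulate-current-cluster sweep by collecting split indices and slicing between
-- consecutive boundaries (objective: alternative decomposition, same cost). Both A and B sort the
-- argument list in place in Python; the equivalence proved here is about the return value.

-- ===== PORT A =====
-- literal port of A: sort, then a single accumulate-current sweep over indices 1..n-1
def cluster_beats_py (beats : List (Int × String)) (gap_threshold : Int) : List (List (Int × String)) :=
  if beats = [] then []
  else
    let s := PySem.List.sorted beats (fun x => x.1) false
    let r :=
      (PySem.List.pyRange 1 (s.length : Int) 1).foldl
        (fun (st : List (List (Int × String)) × List (Int × String)) i =>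
          if gap_threshold < (PySem.List.pyGetD s i default).1 - (PySem.List.pyGetD s (i-1) default).1
          then (st.1 ++ [st.2], [PySem.List.pyGetD s i default])
          else (st.1, st.2 ++ [PySem.List.pyGetD s i default]))
        ([], [PySem.List.pyGetD s 0 default])
    if r.2 ≠ [] then r.1 ++ [r.2] else r.1

-- ===== PORT B =====
-- literal port of B: sort, collect cut indices, slice between consecutive boundaries
def cluster_beats_py_alt (beats : List (Int × String)) (gap_threshold : Int) : List (List (Int × String)) :=
  if beats = [] then []
  else
    let s := PySem.List.sorted beats (fun x => x.1) false
    let n : Int := (s.length : Int)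
    let cuts := (PySem.List.pyRange 1 n 1).filter
        (fun i => decide (gap_threshold < (PySem.List.pyGetD s i default).1 - (PySem.List.pyGetD s (i-1) default).1))
    let bounds : List Int := 0 :: (cuts ++ [n])
    (bounds.zip (PySem.List.slice bounds (some 1) none)).map
      (fun ab => PySem.List.slice s (some ab.1) (some ab.2))

-- ===== PRECONDITION & SPEC =====
def Spec_cluster_beats_py (beats : List (Int × String)) (gap_threshold : Int) (out : List (List (Int × String))) : Prop := out = cluster_beats_py_alt beats gap_threshold
instance (beats : List (Int × String)) (gap_threshold : Int) (out : List (List (Int × String))) : Decidable (Spec_cluster_beats_py beats gap_threshold out) := by unfold Spec_cluster_beats_py; infer_instance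

-- ===== CLAIM (what is proved, stated in full; the proofs are below) =====
def Claim_equal_cluster_beats_py : Prop := ∀ (beats : List (Int × String)) (gap_threshold : Int), Dom_cluster_beats_py beats gap_threshold → Spec_cluster_beats_py beats gap_threshold (cluster_beats_py beats gap_threshold)

-- ===== LEMMAS AND PROOFS =====

def pvPred (s : List (Int × String)) (g : Int) : Int → Bool :=
  fun i => decide (g < (PySem.List.pyGetD s i default).1 - (PySem.List.pyGetD s (i-1) default).1)

def pvStep (s : List (Int × String)) (g : Int)
    (st : List (List (Int × String)) × List (Int × String)) (i : Int) :
    List (List (Int × String)) × List (Int × String) :=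
  if g < (PySem.List.pyGetD s i default).1 - (PySem.List.pyGetD s (i-1) default).1
  then (st.1 ++ [st.2], [PySem.List.pyGetD s i default])
  else (st.1, st.2 ++ [PySem.List.pyGetD s i default])

def pvCuts (s : List (Int × String)) (g : Int) (m : Int) : List Int :=
  (PySem.List.pyRange 1 m 1).filter (pvPred s g)

-- clusters described by a start boundary, a list of cut indices and a stop boundary
def pvSegs (s : List (Int × String)) : Int → List Int → Int → List (List (Int × String))
  | start, [], stop => [PySem.List.slice s (some start) (some stop)]
  | start, c :: cs, stop => PySem.List.slice s (some start) (some c) :: pvSegs s c cs stop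

-- the clusters already closed by the cuts (everything but the trailing open cluster)
def pvClosed (s : List (Int × String)) : Int → List Int → List (List (Int × String))
  | _, [] => []
  | start, c :: cs => PySem.List.slice s (some start) (some c) :: pvClosed s c cs

theorem pvGetLastD_cons (c start : Int) (cs : List Int) :
    (c :: cs).getLastD start = cs.getLastD c := by
  cases cs with
  | nil => simp
  | cons h t =>
    cases hq : (h :: t).getLast? with
    | none => simp at hq
    | some x => simp [hq]

theorem pvSegs_eq_closed (s : List (Int × String)) (cs : List Int) (start stop : Int) :
    pvSegs s start cs stop = pvClosed s start cs ++ [PySem.List.slice s (some (cs.getLastD start)) (some stop)] := by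
  induction cs generalizing start with
  | nil => simp [pvSegs, pvClosed]
  | cons c cs ih => rw [pvGetLastD_cons]; simp [pvSegs, pvClosed, ih c]

theorem pvClosed_append (s : List (Int × String)) (cs : List Int) (start c : Int) :
    pvClosed s start (cs ++ [c]) = pvClosed s start cs ++ [PySem.List.slice s (some (cs.getLastD start)) (some c)] := by
  induction cs generalizing start with
  | nil => simp [pvClosed]
  | cons d ds ih => rw [pvGetLastD_cons]; simp [pvClosed, ih d]

theorem pvZip_map_eq_segs (s : List (Int × String)) (cs : List Int) (start stop : Int) :
    ((start :: (cs ++ [stop])).zip (cs ++ [stop])).map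
        (fun ab => PySem.List.slice s (some ab.1) (some ab.2)) = pvSegs s start cs stop := by
  induction cs generalizing start with
  | nil => simp [pvSegs]
  | cons c cs ih => simpa [pvSegs] using ih c

theorem pvSlice_single (s : List (Int × String)) (j : Nat) (hj : j < s.length) :
    PySem.List.slice s (some (j : Int)) (some ((j : Int) + 1)) = [s[j]] := by
  have h := PySem.List.slice_natCast_add s j 1
  rw [show ((1:Nat):Int) = 1 by norm_num] at h
  rw [h, List.take_one, List.head?_drop, List.getElem?_eq_getElem hj]
  rfl

theorem pvSlice_snoc (s : List (Int × String)) (a j : Nat) (ha : a ≤ j) (hj : j < s.length) :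
    PySem.List.slice s (some (a : Int)) (some (j : Int)) ++ [s[j]]
      = PySem.List.slice s (some (a : Int)) (some ((j : Int) + 1)) := by
  have h1 := PySem.List.slice_natCast s a j
  have h2 := PySem.List.slice_natCast_add s a (j - a + 1)
  have hc : (j : Int) + 1 = (a : Int) + ((j - a + 1 : Nat) : Int) := by push_cast; omega
  rw [h1, hc, h2, List.take_add_one]
  have hg : (List.drop a s)[j - a]? = some s[j] := by
    rw [List.getElem?_drop]
    have hja : a + (j - a) = j := by omega
    rw [hja, List.getElem?_eq_getElem hj]
  rw [hg]
  rfl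

-- loop invariant: after processing indices 1..k+1, A's state is (closed clusters, trailing open slice)
theorem pvInv (s : List (Int × String)) (g : Int) (hne : s ≠ []) :
    ∀ k : Nat, ((k : Int) + 1) ≤ (s.length : Int) →
      ((PySem.List.pyRange 1 ((k : Int) + 1) 1).foldl (pvStep s g)
          ([], [PySem.List.pyGetD s 0 default])
        = (pvClosed s 0 (pvCuts s g ((k : Int) + 1)),
           PySem.List.slice s (some ((pvCuts s g ((k : Int) + 1)).getLastD 0)) (some ((k : Int) + 1))))
      ∧ 0 ≤ (pvCuts s g ((k : Int) + 1)).getLastD 0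
      ∧ (pvCuts s g ((k : Int) + 1)).getLastD 0 < (k : Int) + 1 := by
  intro k
  induction k with
  | zero =>
    intro _
    simp only [Nat.cast_zero, zero_add, pvCuts]
    have hr : PySem.List.pyRange 1 1 1 = [] := by decide
    rw [hr]
    have hlen : 0 < s.length := List.length_pos_iff.mpr hne
    have hs1 : PySem.List.slice s (some 0) (some 1) = [PySem.List.pyGetD s 0 default] := by
      have h := pvSlice_single s 0 hlen
      have hg := PySem.List.pyGetD_eq_getElem s (i := 0) default (by norm_num) (by exact_mod_cast hlen)
      simp only [Nat.cast_zero, zero_add] at h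
      rw [h, hg]
      rfl
    simp [pvClosed, hs1]
  | succ k ih =>
    intro hk
    have hk' : ((k : Int) + 1) ≤ (s.length : Int) := by push_cast at hk ⊢; omega
    obtain ⟨hfold, h0, h1⟩ := ih hk'
    simp only [pvCuts] at hfold h0 h1 ⊢
    have hm : (((k + 1 : Nat)) : Int) + 1 = ((k : Int) + 1) + 1 := by push_cast; ring
    rw [hm, PySem.List.pyRange_one_succ_right (by omega : (1:Int) ≤ (k : Int) + 1),
        List.foldl_append, List.filter_append, hfold]
    simp only [List.foldl_cons, List.foldl_nil]
    have hj : k + 1 < s.length := by push_cast at hk; omega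
    have hget : PySem.List.pyGetD s ((k : Int) + 1) default = s[k + 1] := by
      rw [show ((k : Int) + 1) = (((k + 1 : Nat)) : Int) by push_cast; ring,
          PySem.List.pyGetD_natCast]
      simp [List.getD_eq_getElem?_getD, List.getElem?_eq_getElem hj]
    by_cases hp : g < (PySem.List.pyGetD s ((k : Int) + 1) default).1 - (PySem.List.pyGetD s ((k : Int) + 1 - 1) default).1
    · have hf : List.filter (pvPred s g) [(k : Int) + 1] = [(k : Int) + 1] := by
        simp only [List.filter_cons, List.filter_nil, pvPred, decide_eq_true_eq]
        rw [if_pos hp]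
      rw [hf, pvStep, if_pos hp, pvClosed_append, List.getLastD_concat]
      have hsingle := pvSlice_single s (k + 1) hj
      push_cast at hsingle
      refine ⟨?_, by positivity, by omega⟩
      simp [hget, hsingle]
    · have hf : List.filter (pvPred s g) [(k : Int) + 1] = [] := by
        simp only [List.filter_cons, List.filter_nil, pvPred, decide_eq_true_eq]
        rw [if_neg hp]
      rw [hf, pvStep, if_neg hp, List.append_nil]
      set lc := (List.filter (pvPred s g) (PySem.List.pyRange 1 ((k : Int) + 1) 1)).getLastD 0 with hlc
      have hsnoc := pvSlice_snoc s lc.toNat (k + 1) (by omega) hj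
      have hcast : ((lc.toNat : Nat) : Int) = lc := by omega
      rw [hcast] at hsnoc
      refine ⟨?_, h0, by omega⟩
      simp only [hget]
      rw [Prod.ext_iff]
      exact ⟨rfl, hsnoc⟩

-- ===== VERDICT (by name: the statement is the Claim_ definition above) =====
theorem cluster_beats_py_spec : Claim_equal_cluster_beats_py := by
  intro beats g _
  unfold Spec_cluster_beats_py cluster_beats_py cluster_beats_py_alt
  by_cases hb : beats = []
  · simp [hb]
  · simp only [if_neg hb]
    set s := PySem.List.sorted beats (fun x => x.1) false with hs
    have hne : s ≠ [] := by rw [hs]; simp [PySem.List.sorted_eq_nil_iff]; exact hb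
    have hlen : 0 < s.length := List.length_pos_iff.mpr hne
    obtain ⟨k, hk⟩ : ∃ k : Nat, s.length = k + 1 := ⟨s.length - 1, by omega⟩
    have hkk : ((k : Int) + 1) = (s.length : Int) := by rw [hk]; push_cast; ring
    obtain ⟨hfold, h0, h1⟩ := pvInv s g hne k (le_of_eq hkk)
    simp only [pvCuts] at hfold h0 h1
    rw [hkk] at hfold h0 h1
    have hstep : (fun (st : List (List (Int × String)) × List (Int × String)) (i : Int) =>
          if g < (PySem.List.pyGetD s i default).1 - (PySem.List.pyGetD s (i-1) default).1
          then (st.1 ++ [st.2], [PySem.List.pyGetD s i default])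
          else (st.1, st.2 ++ [PySem.List.pyGetD s i default])) = pvStep s g := rfl
    have hpred : (fun i : Int => decide (g < (PySem.List.pyGetD s i default).1 - (PySem.List.pyGetD s (i-1) default).1)) = pvPred s g := rfl
    rw [hstep, hpred, hfold, PySem.List.slice_from_one, List.tail_cons,
        pvZip_map_eq_segs s (List.filter (pvPred s g) (PySem.List.pyRange 1 ((s.length : Int)) 1)) 0 ((s.length : Int)),
        pvSegs_eq_closed]
    set lc := (List.filter (pvPred s g) (PySem.List.pyRange 1 ((s.length : Int)) 1)).getLastD 0 with hlc
    have hcur : PySem.List.slice s (some lc) (some (s.length : Int)) ≠ [] := by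
      rw [PySem.List.slice_toNat s h0 (by positivity)]
      intro hemp
      have hlem := congrArg List.length hemp
      simp [List.length_take, List.length_drop] at hlem
      omega
    rw [if_pos hcur]
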